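-- pv_equiv track=rewrite | github.com/stevezau/plex_generate_vid_previews | media_preview_generator/config/paths.py | split_library_selectors
-- ===== SOURCE A (Python) =====
-- from typing import Any
--
-- def _is_library_id_value(value: str) -> bool:
--     """Return True when a library selector value looks like a Plex section ID."""
--     return bool(value) and value.isdigit()
--
-- def split_library_selectors(values: Any) -> tuple[list[str], list[str]]:
--     """Split mixed library selectors into section IDs and lowercased titles.
--
--     Args:
--         values: Sequence of selector values from settings/API payloads.
--
--     Returns:
--         Tuple of (`library_ids`, `library_titles`) with duplicates removed while
--         preserving order.
--
--     """
--     if not isinstance(values, list):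
--         return [], []
--
--     library_ids: list[str] = []
--     library_titles: list[str] = []
--     seen_ids = set()
--     seen_titles = set()
--
--     for raw_value in values:
--         if raw_value is None:
--             continue
--         value = str(raw_value).strip()
--         if not value:
--             continue
--         if _is_library_id_value(value):
--             if value not in seen_ids:
--                 seen_ids.add(value)
--                 library_ids.append(value)
--             continue
--         title = value.lower()
--         if title not in seen_titles:
--             seen_titles.add(title)
--             library_titles.append(title)
--
--     return library_ids, library_titles
-- ===== SOURCE B (Python) =====
-- def split_library_selectors(values):
--     if not isinstance(values, list):
--         return [], []
--     ids, titles = [], []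
--     for raw_value in reversed(values):
--         if raw_value is None:
--             continue
--         value = str(raw_value).strip()
--         if not value:
--             continue
--         if value.isdigit():
--             ids = [value] + [x for x in ids if x != value]
--         else:
--             title = value.lower()
--             titles = [title] + [x for x in titles if x != title]
--     return ids, titles
-- ===== Notes on version B (the rewrite author's own statement) =====
-- stated objective: alternative
-- what changed: A scans forward appending fresh values while carrying two seen-sets; B scans the list backward, prepending each normalized value and filtering its duplicates out of the suffix result, so first-occurrence dedup emerges with no auxiliary sets.
import Mathlib
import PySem

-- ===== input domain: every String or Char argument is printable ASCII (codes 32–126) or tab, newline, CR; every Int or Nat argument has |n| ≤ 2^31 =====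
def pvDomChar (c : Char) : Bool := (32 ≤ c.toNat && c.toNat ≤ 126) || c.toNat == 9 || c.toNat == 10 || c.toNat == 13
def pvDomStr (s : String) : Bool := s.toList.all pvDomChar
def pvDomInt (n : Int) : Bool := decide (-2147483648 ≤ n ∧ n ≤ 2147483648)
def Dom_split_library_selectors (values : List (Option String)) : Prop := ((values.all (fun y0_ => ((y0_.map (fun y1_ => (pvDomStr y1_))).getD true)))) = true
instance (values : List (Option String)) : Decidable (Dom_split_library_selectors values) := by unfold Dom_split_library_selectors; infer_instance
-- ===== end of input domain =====

-- B replaces A's forward scan with two seen-sets by a backward scan over reversed(values)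
-- that prepends each normalized value and filters its later duplicates out of the suffix
-- result (no auxiliary sets); objective: alternative algorithm, same result.


-- ===== PORT A =====
-- helper _is_library_id_value: bool(value) and value.isdigit()
def is_library_id_value (value : String) : Bool :=
  decide (value ≠ "") && PySem.Str.strIsdigit value

-- A's loop state: (library_ids, library_titles, seen_ids, seen_titles)
def splitLoopA (st : List String × List String × PySem.Set String × PySem.Set String)
    (raw_value : Option String) :
    List String × List String × PySem.Set String × PySem.Set String :=
  match raw_value with
  | none => st
  | some rv =>
    let (library_ids, library_titles, seen_ids, seen_titles) := st
    let value := PySem.Str.strip rv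
    if value = "" then (library_ids, library_titles, seen_ids, seen_titles)
    else if is_library_id_value value then
      if PySem.Set.contains seen_ids value then (library_ids, library_titles, seen_ids, seen_titles)
      else (library_ids ++ [value], library_titles, PySem.Set.add seen_ids value, seen_titles)
    else
      let title := PySem.Str.lower value
      if PySem.Set.contains seen_titles title then (library_ids, library_titles, seen_ids, seen_titles)
      else (library_ids, library_titles ++ [title], seen_ids, PySem.Set.add seen_titles title)

def split_library_selectors (values : List (Option String)) : List String × List String :=
  let st := values.foldl splitLoopA ([], [], PySem.Set.empty, PySem.Set.empty)
  (st.1, st.2.1)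

-- ===== PORT B =====
-- B's loop (runs over reversed(values)): prepend the normalized value and drop its
-- duplicates from the suffix result by filtering; no seen-sets.
def splitLoopB (acc : List String × List String) (raw_value : Option String) :
    List String × List String :=
  match raw_value with
  | none => acc
  | some rv =>
    let value := PySem.Str.strip rv
    if value = "" then acc
    else if PySem.Str.strIsdigit value then
      (value :: acc.1.filter (fun x => x ≠ value), acc.2)
    else
      let title := PySem.Str.lower value
      (acc.1, title :: acc.2.filter (fun x => x ≠ title))

def split_library_selectors_alt (values : List (Option String)) : List String × List String :=
  values.reverse.foldl splitLoopB ([], [])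

-- ===== PRECONDITION & SPEC =====
def Spec_split_library_selectors (values : List (Option String)) (out : List String × List String) : Prop := out = split_library_selectors_alt values
instance (values : List (Option String)) (out : List String × List String) : Decidable (Spec_split_library_selectors values out) := by unfold Spec_split_library_selectors; infer_instance

-- ===== CLAIM (what is proved, stated in full; the proofs are below) =====
def Claim_equal_split_library_selectors : Prop := ∀ (values : List (Option String)), Dom_split_library_selectors values → Spec_split_library_selectors values (split_library_selectors values)

-- ===== LEMMAS AND PROOFS =====

-- proof-only helper: the classified streams (ids with duplicates, lowered titles with duplicates)
def classifyLoop (acc : List String × List String) (raw_value : Option String) :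
    List String × List String :=
  match raw_value with
  | none => acc
  | some rv =>
    let value := PySem.Str.strip rv
    if value = "" then acc
    else if PySem.Str.strIsdigit value then (acc.1 ++ [value], acc.2)
    else (acc.1, acc.2 ++ [PySem.Str.lower value])

-- the classify fold from any accumulator appends what it produces from ([], [])
lemma classifyLoop_shift (values : List (Option String)) (a b : List String) :
    values.foldl classifyLoop (a, b) =
      (a ++ (values.foldl classifyLoop ([], [])).1, b ++ (values.foldl classifyLoop ([], [])).2) := by
  induction values generalizing a b with
  | nil => simp
  | cons v vs ih =>
    match v with
    | none => simpa [classifyLoop] using ih a b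
    | some rv =>
      by_cases h0 : PySem.Str.strip rv = ""
      · simpa [classifyLoop, h0] using ih a b
      · by_cases hd : PySem.Str.strIsdigit (PySem.Str.strip rv)
        · simp only [List.foldl_cons, classifyLoop, h0, if_false, hd, if_true, List.nil_append]
          rw [ih (a ++ [PySem.Str.strip rv]) b, ih [PySem.Str.strip rv] []]
          simp
        · simp only [List.foldl_cons, classifyLoop, h0, if_false, hd, Bool.false_eq_true, if_false, List.nil_append]
          rw [ih a (b ++ [PySem.Str.lower (PySem.Str.strip rv)]),
              ih [] [PySem.Str.lower (PySem.Str.strip rv)]]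
          simp

-- inside a value ≠ "" branch, A's id test coincides with plain isdigit
lemma is_library_id_value_of_ne (v : String) (h : v ≠ "") :
    is_library_id_value v = PySem.Str.strIsdigit v := by
  simp [is_library_id_value, h]

-- A-side invariant: when the seen-sets equal the output lists, A's fold is the
-- Set.add-fold of the classified streams
lemma splitLoopA_inv (values : List (Option String)) (a b : List String) :
    values.foldl splitLoopA (a, b, a, b) =
      (((values.foldl classifyLoop ([], [])).1.foldl PySem.Set.add a),
       ((values.foldl classifyLoop ([], [])).2.foldl PySem.Set.add b),
       ((values.foldl classifyLoop ([], [])).1.foldl PySem.Set.add a),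
       ((values.foldl classifyLoop ([], [])).2.foldl PySem.Set.add b)) := by
  induction values generalizing a b with
  | nil => simp
  | cons v vs ih =>
    match v with
    | none => simpa [splitLoopA, classifyLoop] using ih a b
    | some rv =>
      by_cases h0 : PySem.Str.strip rv = ""
      · simpa [splitLoopA, classifyLoop, h0] using ih a b
      · by_cases hd : PySem.Str.strIsdigit (PySem.Str.strip rv)
        · have hrest := classifyLoop_shift vs [PySem.Str.strip rv] []
          simp only [List.foldl_cons, splitLoopA, classifyLoop, h0, if_false,
            is_library_id_value_of_ne _ h0, hd, if_true, List.nil_append,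
            List.singleton_append, hrest]
          by_cases hc : PySem.Set.contains a (PySem.Str.strip rv)
          · have hm : PySem.Str.strip rv ∈ a := by simpa using hc
            have hadd : PySem.Set.add a (PySem.Str.strip rv) = a := by
              simp [PySem.Set.add, hm]
            simp only [hc, if_true, hadd, ih a b]
          · have hm : PySem.Str.strip rv ∉ a := by simpa using hc
            have hadd : PySem.Set.add a (PySem.Str.strip rv) = a ++ [PySem.Str.strip rv] := by
              simp [PySem.Set.add, hm]
            simp only [hc, Bool.false_eq_true, if_false, hadd,
              ih (a ++ [PySem.Str.strip rv]) b]
        · have hrest := classifyLoop_shift vs [] [PySem.Str.lower (PySem.Str.strip rv)]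
          simp only [List.foldl_cons, splitLoopA, classifyLoop, h0, if_false,
            is_library_id_value_of_ne _ h0, hd, Bool.false_eq_true, if_false, List.nil_append,
            List.singleton_append, hrest]
          by_cases hc : PySem.Set.contains b (PySem.Str.lower (PySem.Str.strip rv))
          · have hm : PySem.Str.lower (PySem.Str.strip rv) ∈ b := by simpa using hc
            have hadd : PySem.Set.add b (PySem.Str.lower (PySem.Str.strip rv)) = b := by
              simp [PySem.Set.add, hm]
            simp only [hc, if_true, hadd, ih a b]
          · have hm : PySem.Str.lower (PySem.Str.strip rv) ∉ b := by simpa using hc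
            have hadd : PySem.Set.add b (PySem.Str.lower (PySem.Str.strip rv)) =
                b ++ [PySem.Str.lower (PySem.Str.strip rv)] := by
              simp [PySem.Set.add, hm]
            simp only [hc, Bool.false_eq_true, if_false,
              hadd, ih a (b ++ [PySem.Str.lower (PySem.Str.strip rv)])]

-- Set.add-fold from any accumulator s: s followed by the fresh part of the dedup
lemma foldl_add_shift (L : List String) : ∀ s : List String,
    L.foldl PySem.Set.add s =
      s ++ (L.foldl PySem.Set.add []).filter (fun y => decide (y ∉ s)) := by
  induction L with
  | nil => intro s; simp
  | cons a L ih =>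
    intro s
    have hD : L.foldl PySem.Set.add [a] =
        a :: (L.foldl PySem.Set.add []).filter (fun y => decide (y ∉ ([a] : List String))) := by
      simpa using ih [a]
    by_cases hm : a ∈ s
    · have hadd : PySem.Set.add s a = s := by simp [PySem.Set.add, hm]
      have hadd0 : PySem.Set.add ([] : List String) a = [a] := by simp [PySem.Set.add]
      simp only [List.foldl_cons]
      rw [hadd, hadd0, ih s, hD]
      simp only [List.filter_cons, hm, not_true_eq_false, decide_false,
        Bool.false_eq_true, if_false]
      congr 1
      rw [List.filter_filter]
      apply List.filter_congr
      intro y _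
      by_cases hy : y ∈ s
      · have : y = a ∨ y ≠ a := em _
        simp [hy]
      · have hne : y ≠ a := fun h => hy (h ▸ hm)
        simp [hy, hne]
    · have hadd : PySem.Set.add s a = s ++ [a] := by simp [PySem.Set.add, hm]
      have hadd0 : PySem.Set.add ([] : List String) a = [a] := by simp [PySem.Set.add]
      simp only [List.foldl_cons]
      rw [hadd, hadd0, ih (s ++ [a]), hD]
      simp only [List.filter_cons, List.mem_append, hm, List.mem_singleton, not_false_eq_true, decide_true, if_true, List.append_assoc, List.singleton_append]
      congr 2
      rw [List.filter_filter]
      apply List.filter_congr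
      intro y _
      by_cases hy : y = a
      · simp [hy]
      · simp [hy]

-- first-occurrence dedup of a cons: head, then dedup of the tail with the head filtered out
lemma dedup_cons (x : String) (L : List String) :
    PySem.List.dedup (x :: L) = x :: (PySem.List.dedup L).filter (fun y => y ≠ x) := by
  have h1 : PySem.List.dedup (x :: L) = (x :: L).foldl PySem.Set.add [] := by
    simp [PySem.List.dedup_eq_ofList, PySem.Set.ofList_eq_foldl]
  have h2 : PySem.List.dedup L = L.foldl PySem.Set.add [] := by
    simp [PySem.List.dedup_eq_ofList, PySem.Set.ofList_eq_foldl]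
  rw [h1, h2]
  have : (x :: L).foldl PySem.Set.add [] = L.foldl PySem.Set.add [x] := by
    simp [PySem.Set.add]
  rw [this, foldl_add_shift L [x]]
  simp only [List.singleton_append, List.cons.injEq, true_and]
  apply List.filter_congr
  intro y _
  simp

-- B computes the dedup of the classified streams
lemma splitLoopB_eq_dedup (values : List (Option String)) :
    values.reverse.foldl splitLoopB ([], []) =
      (PySem.List.dedup (values.foldl classifyLoop ([], [])).1,
       PySem.List.dedup (values.foldl classifyLoop ([], [])).2) := by
  rw [List.foldl_reverse]
  induction values with
  | nil => simp [PySem.List.dedup]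
  | cons v vs ih =>
    match v with
    | none =>
      simpa [splitLoopB, classifyLoop] using ih
    | some rv =>
      by_cases h0 : PySem.Str.strip rv = ""
      · simpa [splitLoopB, classifyLoop, h0] using ih
      · by_cases hd : PySem.Str.strIsdigit (PySem.Str.strip rv)
        · have hrest := classifyLoop_shift vs [PySem.Str.strip rv] []
          rw [List.foldr_cons, ih]
          simp only [splitLoopB, h0, if_false, hd, if_true,
            List.foldl_cons, classifyLoop, List.nil_append, hrest, List.singleton_append]
          rw [dedup_cons]
        · have hrest := classifyLoop_shift vs [] [PySem.Str.lower (PySem.Str.strip rv)]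
          rw [List.foldr_cons, ih]
          simp only [splitLoopB, h0, if_false, hd, Bool.false_eq_true,
            if_false, List.foldl_cons, classifyLoop, List.nil_append, hrest, List.singleton_append]
          rw [dedup_cons]

-- ===== VERDICT (by name: the statement is the Claim_ definition above) =====
theorem split_library_selectors_spec : Claim_equal_split_library_selectors := by
  intro values _
  unfold Spec_split_library_selectors split_library_selectors split_library_selectors_alt
  have h := splitLoopA_inv values [] []
  show ((values.foldl splitLoopA ([], [], [], [])).1,
        (values.foldl splitLoopA ([], [], [], [])).2.1) =
      values.reverse.foldl splitLoopB ([], [])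
  rw [h, splitLoopB_eq_dedup values]
  simp [PySem.List.dedup_eq_ofList, PySem.Set.ofList_eq_foldl]
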